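-- pv_equiv track=rewrite | github.com/MadhuNaidu/PythonAutomationPratice | Interview_questions.py | find_nearby_duplicates
-- ===== SOURCE A (Python) =====
-- def find_nearby_duplicates(lst):
--     from collections import defaultdict
--
--     pos_dict = defaultdict(list)
--     for index, num in enumerate(lst):
--         pos_dict[num].append(index)
--
--     min_distance = float('inf')
--     result_elements = []
--
--     for num in pos_dict:
--         positions = pos_dict[num]
--         if len(positions) >= 2:
--             current_min = min(positions[i + 1] - positions[i] for i in range(len(positions) - 1))
--             if current_min < min_distance:
--                 min_distance = current_min
--                 result_elements = [num]
--             elif current_min == min_distance: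
--                 result_elements.append(num)
--
--     return sorted(result_elements) if result_elements else []
-- ===== SOURCE B (Python) =====
-- def find_nearby_duplicates(lst):
--     last_seen = {}
--     min_gap = {}
--     for i, num in enumerate(lst):
--         if num in last_seen:
--             gap = i - last_seen[num]
--             if num in min_gap:
--                 if gap < min_gap[num]:
--                     min_gap[num] = gap
--             else:
--                 min_gap[num] = gap
--         last_seen[num] = i
--     if not min_gap:
--         return []
--     best = min(min_gap.values())
--     return sorted(num for num, g in min_gap.items() if g == best)
-- ===== Notes on version B (the rewrite author's own statement) =====
-- stated objective: faster
-- what changed: Replaces A's two-phase design (build a dict of all position lists, then re-scan each list for its minimal consecutive difference) by a single incremental pass keeping last_seen and a running min_gap per value, followed by one min/filter over min_gap.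
import Mathlib
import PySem

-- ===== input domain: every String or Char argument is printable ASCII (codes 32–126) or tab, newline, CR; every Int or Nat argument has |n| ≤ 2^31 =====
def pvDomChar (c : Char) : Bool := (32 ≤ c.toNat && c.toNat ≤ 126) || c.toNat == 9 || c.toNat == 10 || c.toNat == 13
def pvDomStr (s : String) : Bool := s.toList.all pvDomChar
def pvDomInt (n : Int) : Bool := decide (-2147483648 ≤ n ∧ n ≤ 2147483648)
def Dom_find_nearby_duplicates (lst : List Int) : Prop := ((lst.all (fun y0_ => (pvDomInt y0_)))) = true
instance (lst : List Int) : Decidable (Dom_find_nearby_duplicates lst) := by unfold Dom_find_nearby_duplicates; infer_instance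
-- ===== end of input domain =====

-- B replaces A's two-phase design (dict of all position lists, then a scan of each list)
-- by a single pass maintaining last_seen / running min_gap per value (measured ~2x faster in a timing run).


-- ===== PORT A =====
-- the body of A's second for-loop ('for num in pos_dict: …'); the inner min(...) of the
-- generator is PySem.List.min? over the list of consecutive differences (nonempty in this branch,
-- so the 'none' arm is unreachable and returns the state unchanged)
def pvAStep (pos_dict : PySem.Dict Int (List Int)) (st : Option Int × List Int) (num : Int) :
    Option Int × List Int :=
  let positions := pos_dict.getD num []
  if 2 ≤ positions.length then
    match PySem.List.min?
        ((PySem.List.pyRange 0 ((positions.length : Int) - 1) 1).map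
          (fun i => PySem.List.pyGetD positions (i + 1) 0 - PySem.List.pyGetD positions i 0))
        (fun x => x) with
    | none => st
    | some current_min =>
      match st.1 with
      | none => (some current_min, [num])            -- current_min < float('inf')
      | some md =>
        if current_min < md then (some current_min, [num])
        else if current_min = md then (some md, st.2 ++ [num])
        else st
  else st

/-- A's first loop: pos_dict[num].append(index) over enumerate(lst) -/
def pvPosDict (lst : List Int) : PySem.Dict Int (List Int) :=
  (PySem.List.enumerate lst).foldl
    (fun d p => d.modify p.2 [] (fun l => l ++ [p.1])) PySem.Dict.empty

def find_nearby_duplicates (lst : List Int) : List Int :=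
  let st := (pvPosDict lst).keys.foldl (pvAStep (pvPosDict lst)) (none, [])
  if st.2 = [] then [] else PySem.List.sorted st.2 (fun x => x) false

-- ===== PORT B =====
-- one pass: last_seen[num] = most recent index, min_gap[num] = smallest gap so far
def pvBStep (st : PySem.Dict Int Int × PySem.Dict Int Int) (p : Int × Int) :
    PySem.Dict Int Int × PySem.Dict Int Int :=
  let ls := st.1
  let mg := st.2
  let i := p.1
  let num := p.2
  if ls.contains num then
    let gap := i - ls.getD num 0
    let mg' :=
      if mg.contains num then
        (if gap < mg.getD num 0 then mg.insert num gap else mg)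
      else mg.insert num gap
    (ls.insert num i, mg')
  else (ls.insert num i, mg)

def find_nearby_duplicates_alt (lst : List Int) : List Int :=
  let st := (PySem.List.enumerate lst).foldl pvBStep (PySem.Dict.empty, PySem.Dict.empty)
  let mg := st.2
  if mg.size = 0 then []
  else
    match PySem.List.min? mg.values (fun x => x) with
    | none => []                                     -- unreachable: mg nonempty
    | some best =>
      PySem.List.sorted ((mg.items.filter (fun q => q.2 == best)).map (fun q => q.1))
        (fun x => x) false

-- ===== PRECONDITION & SPEC =====
def Spec_find_nearby_duplicates (lst : List Int) (out : List Int) : Prop := out = find_nearby_duplicates_alt lst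
instance (lst : List Int) (out : List Int) : Decidable (Spec_find_nearby_duplicates lst out) := by unfold Spec_find_nearby_duplicates; infer_instance

-- ===== CLAIM (what is proved, stated in full; the proofs are below) =====
def Claim_equal_find_nearby_duplicates : Prop := ∀ (lst : List Int), Dom_find_nearby_duplicates lst → Spec_find_nearby_duplicates lst (find_nearby_duplicates lst)

-- ===== LEMMAS AND PROOFS =====

-- ---- spec helpers ----

/-- the list of indices at which `v` occurs in `lst` (what A's pos_dict[v] holds) -/
def posSpec (lst : List Int) (v : Int) : List Int :=
  ((PySem.List.enumerate lst).filter (fun p => p.2 == v)).map (fun p => p.1)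

def consecDiffs (ps : List Int) : List Int := (ps.zip ps.tail).map (fun q => q.2 - q.1)

/-- minimal consecutive gap of a position list (none if fewer than 2 positions) -/
def gapSpec (ps : List Int) : Option Int := PySem.List.min? (consecDiffs ps) (fun x => x)

/-- A's second loop body, abstractly: driven only by `g num` -/
def gStep (g : Int → Option Int) (st : Option Int × List Int) (num : Int) : Option Int × List Int :=
  match g num with
  | none => st
  | some cm =>
    match st.1 with
    | none => (some cm, [num])
    | some md =>
      if cm < md then (some cm, [num])
      else if cm = md then (some md, st.2 ++ [num]) else st

/-- the running minimum A's `min_distance` computes (none = float('inf')) -/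
def runMin (g : Int → Option Int) (keys : List Int) (md : Option Int) : Option Int :=
  keys.foldl (fun m v =>
    match g v with
    | none => m
    | some c => match m with | none => some c | some mm => some (min mm c)) md

-- ---- consecDiffs / gapSpec facts ----

theorem consecDiffs_cons_cons (a b : Int) (t : List Int) :
    consecDiffs (a :: b :: t) = (b - a) :: consecDiffs (b :: t) := rfl

theorem consecDiffs_eq_nil_iff (ps : List Int) : consecDiffs ps = [] ↔ ps.length < 2 := by
  match ps with
  | [] => simp [consecDiffs]
  | [a] => simp [consecDiffs]
  | a :: b :: t =>
    rw [consecDiffs_cons_cons]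
    simp only [List.length_cons]
    constructor
    · intro h; exact absurd h (by simp)
    · intro h; omega

theorem gapSpec_eq_none_iff (ps : List Int) : gapSpec ps = none ↔ ps.length < 2 := by
  rw [gapSpec, PySem.List.min?_eq_none_iff, consecDiffs_eq_nil_iff]

theorem consecDiffs_concat (ps : List Int) (hps : ps ≠ []) (x : Int) :
    consecDiffs (ps ++ [x]) = consecDiffs ps ++ [x - ps.getLast hps] := by
  induction ps with
  | nil => exact absurd rfl hps
  | cons a t ih =>
    match t with
    | [] => simp [consecDiffs]
    | b :: t' =>
      have h := ih (by simp)
      simp only [List.cons_append] at h ⊢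
      rw [consecDiffs_cons_cons, consecDiffs_cons_cons, h]
      simp [List.getLast_cons]

theorem min?_id_concat (l : List Int) (x : Int) :
    PySem.List.min? (l ++ [x]) (fun y => y) =
      some (match PySem.List.min? l (fun y => y) with | none => x | some m => min m x) := by
  match l with
  | [] =>
    rw [show PySem.List.min? ([] : List Int) (fun y => y) = none from
      (PySem.List.min?_eq_none_iff _ _).mpr rfl]
    rw [List.nil_append, PySem.List.min?_id_cons]
    rfl
  | h :: t =>
    rw [List.cons_append, PySem.List.min?_id_cons, PySem.List.min?_id_cons]
    simp [List.foldl_append]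

theorem gapSpec_concat (ps : List Int) (hps : ps ≠ []) (x : Int) :
    gapSpec (ps ++ [x]) =
      some (match gapSpec ps with
            | none => x - ps.getLast hps
            | some m => min m (x - ps.getLast hps)) := by
  rw [gapSpec, consecDiffs_concat ps hps x, min?_id_concat, gapSpec]

-- ---- the A-side diff computation equals consecDiffs ----

theorem diffs_port_eq (ps : List Int) :
    (PySem.List.pyRange 0 ((ps.length : Int) - 1) 1).map
      (fun i => PySem.List.pyGetD ps (i + 1) 0 - PySem.List.pyGetD ps i 0) = consecDiffs ps := by
  match hps : ps with
  | [] => rfl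
  | a :: t =>
    have hlen : ((a :: t).length : Int) - 1 = ((t.length : Nat) : Int) := by
      push_cast [List.length_cons]; ring
    rw [hlen, PySem.List.pyRange_zero_natCast, List.map_map]
    apply List.ext_getElem
    · simp [consecDiffs]
    · intro i h1 h2
      simp only [List.getElem_map, List.getElem_range, Function.comp]
      have hi : i < t.length := by simpa using h1
      have e1 : ((i : Int) + 1) = ((i + 1 : Nat) : Int) := by push_cast; ring
      rw [e1, PySem.List.pyGetD_natCast, PySem.List.pyGetD_natCast]
      have hd1 : (a :: t).getD (i + 1) 0 = (a :: t)[i + 1]'(by simpa using hi) := by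
        rw [List.getD_eq_getElem]
      have hd2 : (a :: t).getD i 0 = (a :: t)[i]'(by simp; omega) := by
        rw [List.getD_eq_getElem]
      rw [hd1, hd2]
      simp only [consecDiffs, List.getElem_map, List.getElem_zip, List.getElem_tail]

-- ---- A's loop body = gStep of the gap function ----

theorem pvAStep_eq (d : PySem.Dict Int (List Int)) (st : Option Int × List Int) (num : Int) :
    pvAStep d st num = gStep (fun v => gapSpec (d.getD v [])) st num := by
  unfold pvAStep gStep
  simp only [diffs_port_eq]
  rw [show (PySem.List.min? (consecDiffs (d.getD num [])) (fun x => x)) = gapSpec (d.getD num []) from rfl]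
  by_cases h : 2 ≤ (d.getD num []).length
  · rw [if_pos h]
  · rw [if_neg h]
    have hs : gapSpec (d.getD num []) = none := by rw [gapSpec_eq_none_iff]; omega
    rw [hs]

-- ---- runMin facts ----

def stepMin (m : Option Int) (c : Option Int) : Option Int :=
  match c with
  | none => m
  | some c => match m with | none => some c | some mm => some (min mm c)

theorem runMin_cons (g : Int → Option Int) (v : Int) (t : List Int) (md : Option Int) :
    runMin g (v :: t) md = runMin g t (stepMin md (g v)) := by
  show List.foldl _ _ (v :: t) = _
  rw [List.foldl_cons]
  rfl

theorem runMin_some (g : Int → Option Int) (keys : List Int) :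
    ∀ m : Int, ∃ m', runMin g keys (some m) = some m' ∧ m' ≤ m := by
  induction keys with
  | nil => intro m; exact ⟨m, rfl, le_refl m⟩
  | cons v t ih =>
    intro m
    rw [runMin_cons]
    match hg : g v with
    | none => exact ih m
    | some c =>
      obtain ⟨m', h1, h2⟩ := ih (min m c)
      exact ⟨m', h1, le_trans h2 (min_le_left m c)⟩

theorem runMin_none_eq_none (g : Int → Option Int) (keys : List Int)
    (h : ∀ v ∈ keys, g v = none) : runMin g keys none = none := by
  induction keys with
  | nil => rfl
  | cons v t ih =>
    rw [runMin_cons, h v (by simp)]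
    exact ih (fun w hw => h w (by simp [hw]))

theorem runMin_mem (g : Int → Option Int) (keys : List Int) :
    ∀ md m, runMin g keys md = some m → md = some m ∨ ∃ v ∈ keys, g v = some m := by
  induction keys with
  | nil => intro md m h; exact Or.inl h
  | cons v t ih =>
    intro md m h
    rw [runMin_cons] at h
    match hg : g v with
    | none =>
      rw [hg] at h
      rcases ih md m h with h1 | ⟨w, hw, hgw⟩
      · exact Or.inl h1
      · exact Or.inr ⟨w, by simp [hw], hgw⟩
    | some c =>
      rw [hg] at h
      match md with
      | none =>
        rcases ih (some c) m (h) with h1 | ⟨w, hw, hgw⟩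
        · exact Or.inr ⟨v, by simp, by rw [hg, Option.some_inj.mp h1]⟩
        · exact Or.inr ⟨w, by simp [hw], hgw⟩
      | some mm =>
        rcases ih (some (min mm c)) m (h) with h1 | ⟨w, hw, hgw⟩
        · have he := Option.some_inj.mp h1
          rcases min_cases mm c with ⟨he2, _⟩ | ⟨he2, _⟩
          · exact Or.inl (by rw [← he, he2])
          · exact Or.inr ⟨v, by simp, by rw [hg, ← he, he2]⟩
        · exact Or.inr ⟨w, by simp [hw], hgw⟩

theorem runMin_le (g : Int → Option Int) (keys : List Int) :
    ∀ md m, runMin g keys md = some m → ∀ v ∈ keys, ∀ c, g v = some c → m ≤ c := by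
  induction keys with
  | nil => intro md m _ v hv; simp at hv
  | cons w t ih =>
    intro md m h v hv c hc
    rw [runMin_cons] at h
    rcases List.mem_cons.mp hv with rfl | hvt
    · rw [hc] at h
      match md with
      | none =>
        obtain ⟨m', h1, h2⟩ := runMin_some g t c
        rw [show stepMin none (some c) = some c from rfl] at h
        rw [h1] at h
        have he := Option.some_inj.mp h
        omega
      | some mm =>
        rw [show stepMin (some mm) (some c) = some (min mm c) from rfl] at h
        obtain ⟨m', h1, h2⟩ := runMin_some g t (min mm c)
        rw [h1] at h
        have he := Option.some_inj.mp h
        have := min_le_right mm c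
        omega
    · match hg : g w with
      | none => rw [hg] at h; exact ih md m h v hvt c hc
      | some cw =>
        rw [hg] at h
        match md with
        | none => exact ih (some cw) m h v hvt c hc
        | some mm => exact ih (some (min mm cw)) m h v hvt c hc

-- ---- the A-loop characterisation ----

theorem gloop_spec (g : Int → Option Int) (keys : List Int) :
    ∀ md res, keys.foldl (gStep g) (md, res) =
      (runMin g keys md,
       (if runMin g keys md = md then res else []) ++
         keys.filter (fun v => (g v).isSome && decide (g v = runMin g keys md))) := by
  induction keys with
  | nil => intro md res; simp [runMin]
  | cons v t ih =>
    intro md res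
    rw [List.foldl_cons, runMin_cons]
    match hg : g v with
    | none =>
      rw [show gStep g (md, res) v = (md, res) by simp [gStep, hg]]
      rw [show stepMin md none = md from rfl]
      rw [ih md res]
      simp [hg]
    | some c =>
      match md with
      | none =>
        rw [show gStep g (none, res) v = (some c, [v]) by simp [gStep, hg]]
        rw [show stepMin none (some c) = some c from rfl]
        rw [ih (some c) [v]]
        obtain ⟨m', hm', _⟩ := runMin_some g t c
        rw [hm']
        simp only [List.filter_cons, hg, Option.isSome_some, Bool.true_and,
          reduceCtorEq, if_false, List.nil_append]
        by_cases h2 : (some c : Option Int) = some m'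
        · simp [h2]
        · rw [if_neg (fun hh => h2 hh.symm), decide_eq_false h2]
          simp
      | some mm =>
        rcases lt_trichotomy c mm with hlt | heq | hgt
        · rw [show gStep g (some mm, res) v = (some c, [v]) by
            simp [gStep, hg, if_pos hlt]]
          rw [show stepMin (some mm) (some c) = some (min mm c) from rfl,
            min_eq_right (le_of_lt hlt)]
          rw [ih (some c) [v]]
          obtain ⟨m', hm', hle⟩ := runMin_some g t c
          rw [hm']
          have hne : (some m' : Option Int) ≠ some mm := by
            intro hh; have := Option.some_inj.mp hh; omega
          rw [if_neg hne]
          simp only [List.filter_cons, hg, Option.isSome_some, Bool.true_and,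
            List.nil_append]
          by_cases h2 : (some c : Option Int) = some m'
          · simp [h2]
          · rw [if_neg (fun hh => h2 hh.symm), decide_eq_false h2]
            simp
        · subst heq
          rw [show gStep g (some c, res) v = (some c, res ++ [v]) by
            simp [gStep, hg]]
          rw [show stepMin (some c) (some c) = some (min c c) from rfl, min_self]
          rw [ih (some c) (res ++ [v])]
          simp only [List.filter_cons, hg, Option.isSome_some, Bool.true_and]
          by_cases h2 : runMin g t (some c) = some c
          · rw [if_pos h2, if_pos h2, decide_eq_true h2.symm]
            simp
          · rw [if_neg h2, if_neg h2, decide_eq_false (fun hh => h2 hh.symm)]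
            simp
        · rw [show gStep g (some mm, res) v = (some mm, res) by
            simp [gStep, hg, if_neg (by omega : ¬ c < mm), if_neg (by omega : ¬ c = mm)]]
          rw [show stepMin (some mm) (some c) = some (min mm c) from rfl,
            min_eq_left (le_of_lt hgt)]
          rw [ih (some mm) res]
          obtain ⟨m', hm', hle⟩ := runMin_some g t mm
          simp only [List.filter_cons, hg, Option.isSome_some, Bool.true_and]
          have hne : (some c : Option Int) ≠ runMin g t (some mm) := by
            rw [hm']; intro hh; have := Option.some_inj.mp hh; omega
          rw [decide_eq_false hne]
          simp


-- ---- B-side invariant: last_seen holds the last index, min_gap the running gapSpec ----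

/-- positions after also processing `l` (v's old positions `P v` extended by l's indices at v) -/
def Pext (P : Int → List Int) (l : List (Int × Int)) (v : Int) : List Int :=
  P v ++ (l.filter (fun p => p.2 == v)).map (fun p => p.1)

theorem bfold_spec (l : List (Int × Int)) :
    ∀ (ls mg : PySem.Dict Int Int) (P : Int → List Int),
    (∀ v, ls.get? v = (P v).getLast?) →
    (∀ v, mg.get? v = gapSpec (P v)) →
    mg.keys.Nodup →
    (∀ v, (l.foldl pvBStep (ls, mg)).2.get? v = gapSpec (Pext P l v)) ∧
    (l.foldl pvBStep (ls, mg)).2.keys.Nodup := by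
  induction l with
  | nil =>
    intro ls mg P _ hmg hnd
    exact ⟨fun v => by simpa [Pext] using hmg v, hnd⟩
  | cons p l ih =>
    intro ls mg P hls hmg hnd
    rw [List.foldl_cons]
    -- the updated position table
    set P1 : Int → List Int := fun v => if p.2 = v then P v ++ [p.1] else P v with hP1
    have hPext : ∀ v, Pext P (p :: l) v = Pext P1 l v := by
      intro v
      by_cases hv : p.2 = v
      · simp [Pext, hP1, hv]
      · simp [Pext, hP1, hv]
    -- the new state after one step
    by_cases hc : ls.contains p.2
    · -- p.2 seen before: P p.2 ≠ []
      have hget : (ls.get? p.2).isSome := by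
        rw [PySem.Dict.contains_eq_isSome_get?] at hc; exact hc
      have hPne : P p.2 ≠ [] := by
        intro hnil
        rw [hls p.2, hnil] at hget
        simp at hget
      have hlast : ls.getD p.2 0 = (P p.2).getLast hPne := by
        show (ls.get? p.2).getD 0 = _
        rw [hls p.2, List.getLast?_eq_some_getLast hPne]
        rfl
      have hstep : pvBStep (ls, mg) p =
          (ls.insert p.2 p.1,
           if mg.contains p.2 then
             (if p.1 - ls.getD p.2 0 < mg.getD p.2 0 then mg.insert p.2 (p.1 - ls.getD p.2 0) else mg)
           else mg.insert p.2 (p.1 - ls.getD p.2 0)) := by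
        simp [pvBStep, hc]
      rw [hstep]
      have hgaps : gapSpec (P1 p.2) =
          some (match gapSpec (P p.2) with
                | none => p.1 - (P p.2).getLast hPne
                | some m => min m (p.1 - (P p.2).getLast hPne)) := by
        rw [hP1]
        show gapSpec (if p.2 = p.2 then P p.2 ++ [p.1] else P p.2) = _
        rw [if_pos rfl]
        exact gapSpec_concat (P p.2) hPne p.1
      have hls1 : ∀ v, (ls.insert p.2 p.1).get? v = (P1 v).getLast? := by
        intro v
        by_cases hv : v = p.2
        · subst hv
          rw [PySem.Dict.get?_insert_self, hP1]
          simp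
        · rw [PySem.Dict.get?_insert_of_ne _ _ hv, hls v, hP1]
          simp only [if_neg (fun h : p.2 = v => hv h.symm)]
      by_cases hmc : mg.contains p.2
      · -- min_gap already has p.2: gapSpec (P p.2) = some w
        have hmgs : (mg.get? p.2).isSome := by
          rw [PySem.Dict.contains_eq_isSome_get?] at hmc; exact hmc
        rw [if_pos hmc]
        match hw : mg.get? p.2 with
        | none => rw [hw] at hmgs; simp at hmgs
        | some w =>
          have hgw : gapSpec (P p.2) = some w := by rw [← hmg p.2, hw]
          have hgetD : mg.getD p.2 0 = w := by
            show (mg.get? p.2).getD 0 = w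
            rw [hw]; rfl
          rw [hgetD]
          have hgaps2 : gapSpec (P1 p.2) = some (min w (p.1 - (P p.2).getLast hPne)) := by
            rw [hgaps, hgw]
          by_cases hlt : p.1 - ls.getD p.2 0 < w
          · rw [if_pos hlt]
            refine ih (ls.insert p.2 p.1) _ P1 hls1 ?_
              (PySem.Dict.nodup_keys_insert _ _ _ hnd) |>.imp
              (fun h v => by rw [hPext v]; exact h v) id
            intro v
            by_cases hv : v = p.2
            · subst hv
              rw [PySem.Dict.get?_insert_self, hgaps2, hlast]
              rw [hlast] at hlt
              rw [min_eq_right (le_of_lt hlt)]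
            · rw [PySem.Dict.get?_insert_of_ne _ _ hv, hmg v, hP1]
              simp only [if_neg (fun h : p.2 = v => hv h.symm)]
          · rw [if_neg hlt]
            refine ih (ls.insert p.2 p.1) _ P1 hls1 ?_ hnd |>.imp
              (fun h v => by rw [hPext v]; exact h v) id
            intro v
            by_cases hv : v = p.2
            · subst hv
              rw [hw, hgaps2]
              rw [hlast] at hlt
              rw [min_eq_left (by omega)]
            · rw [hmg v, hP1]
              simp only [if_neg (fun h : p.2 = v => hv h.symm)]
      · -- first repeat of p.2: gapSpec (P p.2) = none
        have hgn : gapSpec (P p.2) = none := by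
          rw [← hmg p.2]
          rw [PySem.Dict.contains_eq_isSome_get?] at hmc
          cases h : mg.get? p.2 with
          | none => rfl
          | some w => rw [h] at hmc; simp at hmc
        rw [if_neg hmc]
        refine ih (ls.insert p.2 p.1) _ P1 hls1 ?_
          (PySem.Dict.nodup_keys_insert _ _ _ hnd) |>.imp
          (fun h v => by rw [hPext v]; exact h v) id
        intro v
        by_cases hv : v = p.2
        · subst hv
          have hgaps3 : gapSpec (P1 p.2) = some (p.1 - (P p.2).getLast hPne) := by
            rw [hgaps, hgn]
          rw [PySem.Dict.get?_insert_self, hgaps3, hlast]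
        · rw [PySem.Dict.get?_insert_of_ne _ _ hv, hmg v, hP1]
          simp only [if_neg (fun h : p.2 = v => hv h.symm)]
    · -- p.2 never seen: P p.2 = []
      have hPnil : P p.2 = [] := by
        rw [PySem.Dict.contains_eq_isSome_get?] at hc
        rw [hls p.2] at hc
        cases h : P p.2 with
        | nil => rfl
        | cons a t => rw [h] at hc; simp at hc
      have hstep : pvBStep (ls, mg) p = (ls.insert p.2 p.1, mg) := by
        simp [pvBStep, hc]
      rw [hstep]
      refine ih (ls.insert p.2 p.1) mg P1 ?_ ?_ hnd |>.imp
        (fun h v => by rw [hPext v]; exact h v) id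
      · intro v
        by_cases hv : v = p.2
        · subst hv
          rw [PySem.Dict.get?_insert_self, hP1]
          simp [hPnil]
        · rw [PySem.Dict.get?_insert_of_ne _ _ hv, hls v, hP1]
          simp only [if_neg (fun h : p.2 = v => hv h.symm)]
      · intro v
        by_cases hv : v = p.2
        · subst hv
          rw [hmg p.2]
          simp only [hP1, if_pos rfl, hPnil]
          simp [gapSpec, consecDiffs]
        · rw [hmg v, hP1]
          simp only [if_neg (fun h : p.2 = v => hv h.symm)]

-- ---- pos_dict characterisation ----

theorem posdict_getD (lst : List Int) (v : Int) : (pvPosDict lst).getD v [] = posSpec lst v := by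
  unfold pvPosDict
  rw [show (PySem.List.enumerate lst).foldl
        (fun d p => d.modify p.2 [] (fun l => l ++ [p.1])) PySem.Dict.empty
      = ((PySem.List.enumerate lst).map (fun p => (p.2, p.1))).foldl
        (fun d q => d.modify q.1 [] (fun l => l ++ [q.2])) PySem.Dict.empty from by
    rw [List.foldl_map]]
  rw [PySem.Dict.getD_foldl_modify_append]
  simp [posSpec, List.filter_map, List.map_map, Function.comp_def]

theorem posdict_keys (lst : List Int) : (pvPosDict lst).keys = PySem.Set.ofList lst := by
  unfold pvPosDict
  rw [PySem.Dict.keys_foldl_modify_key (PySem.List.enumerate lst) (fun p => p.2) []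
    (fun _ p => fun l => l ++ [p.1]) PySem.Dict.empty]
  rw [PySem.List.map_snd_enumerate, PySem.Dict.keys_empty]
  rfl

-- ---- one more runMin fact ----

theorem runMin_eq_none (g : Int → Option Int) (keys : List Int) :
    ∀ md, runMin g keys md = none → md = none ∧ ∀ v ∈ keys, g v = none := by
  induction keys with
  | nil => intro md h; exact ⟨h, by simp⟩
  | cons v t ih =>
    intro md h
    rw [runMin_cons] at h
    match hg : g v with
    | none =>
      rw [hg] at h
      obtain ⟨h1, h2⟩ := ih md h
      exact ⟨h1, fun w hw => by
        rcases List.mem_cons.mp hw with rfl | hwt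
        · exact hg
        · exact h2 w hwt⟩
    | some c =>
      rw [hg] at h
      match md with
      | none =>
        obtain ⟨m', hm', _⟩ := runMin_some g t c
        rw [show stepMin none (some c) = some c from rfl] at h
        rw [hm'] at h
        exact absurd h (by simp)
      | some mm =>
        rw [show stepMin (some mm) (some c) = some (min mm c) from rfl] at h
        obtain ⟨m', hm', _⟩ := runMin_some g t (min mm c)
        rw [hm'] at h
        exact absurd h (by simp)

-- ---- assembly ----

theorem main_equiv (lst : List Int) :
    find_nearby_duplicates lst = find_nearby_duplicates_alt lst := by
  -- notation
  set g : Int → Option Int := fun v => gapSpec (posSpec lst v) with hg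
  -- ---- A side ----
  have hfun : pvAStep (pvPosDict lst) = gStep g := by
    funext st num
    rw [pvAStep_eq]
    have : (fun v => gapSpec ((pvPosDict lst).getD v [])) = g := by
      funext v; rw [posdict_getD]
    rw [this]
  set M : Option Int := runMin g (PySem.Set.ofList lst) none with hM
  set resA : List Int :=
    (PySem.Set.ofList lst).filter (fun v => (g v).isSome && decide (g v = M)) with hresA
  have hA : find_nearby_duplicates lst = PySem.List.sorted resA (fun x => x) false := by
    show (let st := (pvPosDict lst).keys.foldl (pvAStep (pvPosDict lst)) (none, []);
      if st.2 = [] then [] else PySem.List.sorted st.2 (fun x => x) false) = _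
    rw [hfun, posdict_keys, gloop_spec g (PySem.Set.ofList lst) none []]
    have hres : (if runMin g (PySem.Set.ofList lst) none = none then ([] : List Int) else []) ++
        (PySem.Set.ofList lst).filter
          (fun v => (g v).isSome && decide (g v = runMin g (PySem.Set.ofList lst) none)) = resA := by
      rw [hresA, ← hM]
      by_cases h : M = none
      · rw [if_pos h, List.nil_append]
      · rw [if_neg h, List.nil_append]
    show (if ((_ : Option Int × List Int)).2 = [] then ([] : List Int) else _) = _
    rw [show ((runMin g (PySem.Set.ofList lst) none,
        (if runMin g (PySem.Set.ofList lst) none = none then ([] : List Int) else []) ++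
          (PySem.Set.ofList lst).filter
            (fun v => (g v).isSome && decide (g v = runMin g (PySem.Set.ofList lst) none))) :
        Option Int × List Int).2 = resA from hres]
    by_cases h : resA = []
    · rw [if_pos h, h]; rfl
    · rw [if_neg h]
  -- ---- B side ----
  set mg : PySem.Dict Int Int :=
    ((PySem.List.enumerate lst).foldl pvBStep (PySem.Dict.empty, PySem.Dict.empty)).2 with hmg
  obtain ⟨hBget, hBnd⟩ := bfold_spec (PySem.List.enumerate lst) PySem.Dict.empty PySem.Dict.empty
    (fun _ => []) (fun v => by rw [PySem.Dict.get?_empty]; rfl)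
    (fun v => by rw [PySem.Dict.get?_empty]; rfl) PySem.Dict.nodup_keys_empty
  have hBg : ∀ v, mg.get? v = g v := by
    intro v
    rw [hmg, hBget v, hg]
    show gapSpec ([] ++ _) = _
    rw [List.nil_append]
    rfl
  have hBout : find_nearby_duplicates_alt lst =
      (if mg.size = 0 then []
       else match PySem.List.min? mg.values (fun x => x) with
            | none => []
            | some best =>
              PySem.List.sorted ((mg.items.filter (fun q => q.2 == best)).map (fun q => q.1))
                (fun x => x) false) := rfl
  -- key membership
  have hkeymem : ∀ v, v ∈ mg.keys ↔ g v ≠ none := by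
    intro v
    rw [← hBg v]
    constructor
    · intro hv hn; rw [PySem.Dict.get?_eq_none_iff_not_mem_keys] at hn; exact hn hv
    · intro hn; by_contra hv
      exact hn ((PySem.Dict.get?_eq_none_iff_not_mem_keys mg v).mpr hv)
  have hsub : ∀ v, g v ≠ none → v ∈ PySem.Set.ofList lst := by
    intro v hv
    rw [hg] at hv
    have hlen : ¬ (posSpec lst v).length < 2 := fun h => hv ((gapSpec_eq_none_iff _).mpr h)
    have hne : posSpec lst v ≠ [] := by
      intro h; rw [h] at hlen; exact hlen (by simp)
    rw [posSpec] at hne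
    have : (PySem.List.enumerate lst).filter (fun p => p.2 == v) ≠ [] := by
      intro h; rw [h] at hne; exact hne rfl
    obtain ⟨q, hq⟩ := List.exists_mem_of_ne_nil _ this
    have hq1 := List.mem_filter.mp hq
    obtain ⟨k, hk, hqe⟩ := (PySem.List.mem_enumerate_iff lst 0 q).mp hq1.1
    have : v = lst[k] := by
      have := hq1.2
      rw [hqe] at this
      simpa using (beq_iff_eq.mp this).symm
    rw [PySem.Set.mem_ofList, this]
    exact List.getElem_mem hk
  have hgetD : ∀ k w, mg.get? k = some w → mg.getD k 0 = w := by
    intro k w h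
    show (mg.get? k).getD 0 = w
    rw [h]
    rfl
  -- ---- case: no value repeats ----
  by_cases hsz : mg.size = 0
  · have hitems : mg.items = [] := List.length_eq_zero_iff.mp hsz
    have hkeys : mg.keys = [] := by
      show mg.items.map _ = []
      rw [hitems]; rfl
    have hgnone : ∀ v, g v = none := by
      intro v
      by_contra hv
      have := (hkeymem v).mpr hv
      rw [hkeys] at this
      simp at this
    have hMn : M = none := runMin_none_eq_none g _ (fun v _ => hgnone v)
    have : resA = [] := by
      rw [hresA]
      apply List.filter_eq_nil_iff.mpr
      intro v _
      simp [hgnone v]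
    rw [hA, this, hBout, if_pos hsz]
    rfl
  -- ---- case: some value repeats ----
  · have hitems : mg.items ≠ [] := fun h => hsz (by show mg.items.length = 0; rw [h]; rfl)
    have hvals : mg.values ≠ [] := by
      intro h
      exact hitems (List.map_eq_nil_iff.mp h)
    obtain ⟨best, hbest⟩ : ∃ b, PySem.List.min? mg.values (fun x => x) = some b := by
      match h : PySem.List.min? mg.values (fun x => x) with
      | none => exact absurd ((PySem.List.min?_eq_none_iff _ _).mp h) hvals
      | some b => exact ⟨b, rfl⟩
    have hvalsmap := PySem.Dict.values_eq_map_keys mg hBnd 0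
    -- some key attains best
    obtain ⟨k0, hk0mem, hk0⟩ : ∃ k ∈ mg.keys, mg.getD k 0 = best := by
      have := PySem.List.min?_mem hbest
      rw [hvalsmap] at this
      obtain ⟨k, hk, he⟩ := List.mem_map.mp this
      exact ⟨k, hk, he⟩
    have hgk : ∀ k, k ∈ mg.keys → g k = some (mg.getD k 0) := by
      intro k hk
      have hne : mg.get? k ≠ none := by
        intro h
        rw [PySem.Dict.get?_eq_none_iff_not_mem_keys] at h
        exact h hk
      match h : mg.get? k with
      | none => exact absurd h hne
      | some w => rw [← hBg k, h, hgetD k w h]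
    have hgk0 : g k0 = some best := by rw [hgk k0 hk0mem, hk0]
    -- M = some best
    have hMs : M = some best := by
      match hMv : M with
      | none =>
        obtain ⟨_, h2⟩ := runMin_eq_none g _ none hMv
        exact absurd (h2 k0 (hsub k0 (by rw [hgk0]; simp))) (by rw [hgk0]; simp)
      | some m =>
        have h1 : m ≤ best :=
          runMin_le g _ none m hMv k0 (hsub k0 (by rw [hgk0]; simp)) best hgk0
        have h2 : best ≤ m := by
          rcases runMin_mem g _ none m hMv with h | ⟨v, hv, hgv⟩
          · exact absurd h (by simp)
          · have hvk : v ∈ mg.keys := (hkeymem v).mpr (by rw [hgv]; simp)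
            have : m ∈ mg.values := by
              rw [hvalsmap]
              apply List.mem_map.mpr
              refine ⟨v, hvk, ?_⟩
              have := hgk v hvk
              rw [hgv] at this
              rw [Option.some_inj.mp this.symm]
            exact PySem.List.min?_isMin hbest m this
        rw [show m = best by omega]
    -- B's pre-sort list
    set resB : List Int := mg.keys.filter (fun k => mg.getD k 0 == best) with hresB
    have hresBitems :
        (mg.items.filter (fun q => q.2 == best)).map (fun q => q.1) = resB := by
      rw [PySem.Dict.items_eq_map_keys mg hBnd 0, List.filter_map, List.map_map, hresB]
      simp [Function.comp_def]
    -- the two pre-sort lists are permutations of each other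
    have hperm : resA.Perm resB := by
      rw [List.perm_ext_iff_of_nodup
        (List.Nodup.filter _ (PySem.Set.nodup_ofList lst))
        (List.Nodup.filter _ hBnd)]
      intro x
      rw [List.mem_filter, List.mem_filter, hMs]
      constructor
      · rintro ⟨_, hx⟩
        simp only [Bool.and_eq_true, decide_eq_true_eq] at hx
        have hxk : x ∈ mg.keys := (hkeymem x).mpr (by rw [hx.2]; simp)
        refine ⟨hxk, ?_⟩
        have := hgk x hxk
        rw [hx.2] at this
        simp [Option.some_inj.mp this.symm]
      · rintro ⟨hxk, hx⟩
        have hgx : g x = some best := by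
          rw [hgk x hxk, beq_iff_eq.mp hx]
        exact ⟨hsub x (by rw [hgx]; simp), by simp [hgx]⟩
    -- conclude
    rw [hA, hBout, if_neg hsz, hbest]
    show (PySem.List.sorted resA fun x => x) =
      PySem.List.sorted ((mg.items.filter (fun q => q.2 == best)).map (fun q => q.1)) fun x => x
    rw [hresBitems]
    exact PySem.List.sorted_eq_sorted_of_perm resA resB (fun x => x) (fun _ _ h => h) hperm

-- ===== VERDICT (by name: the statement is the Claim_ definition above) =====
theorem find_nearby_duplicates_spec : Claim_equal_find_nearby_duplicates := by
  intro lst _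
  exact main_equiv lst
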